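-- pv_equiv track=rewrite | github.com/csnowhermit/develop-python-case | NLP/textCategory/bayes/bayes_train.py | isChat
-- ===== SOURCE A (Python) =====
-- def isChat(sentences):
--     tag = True    # 默认是闲聊
--     if len(str(sentences).strip()) == 0:    # 如果分词列表无内容，则认为是闲聊
--         return tag
--
--     arr = str(sentences).split(" ")
--     for a in arr:
--         if len(a)>1:
--             tag = False    # 标记该问话不是闲聊
--             return tag
-- ===== SOURCE B (Python) =====
-- def isChat(sentences):
--     s = str(sentences)
--     if not s.strip():
--         return True
--     run = 0
--     for c in s:
--         run = 0 if c == ' ' else run + 1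
--         if run == 2:
--             return False
--     return True
-- ===== Notes on version B (the rewrite author's own statement) =====
-- stated objective: alternative
-- what changed: Instead of splitting the string on single spaces into a token list and measuring each token's length, B runs a one-pass state machine over characters, tracking the current run length of non-space characters and stopping as soon as a run reaches 2.
-- outside the precondition, e.g. on isChat('a b'): A returns None, B returns True
import Mathlib
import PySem

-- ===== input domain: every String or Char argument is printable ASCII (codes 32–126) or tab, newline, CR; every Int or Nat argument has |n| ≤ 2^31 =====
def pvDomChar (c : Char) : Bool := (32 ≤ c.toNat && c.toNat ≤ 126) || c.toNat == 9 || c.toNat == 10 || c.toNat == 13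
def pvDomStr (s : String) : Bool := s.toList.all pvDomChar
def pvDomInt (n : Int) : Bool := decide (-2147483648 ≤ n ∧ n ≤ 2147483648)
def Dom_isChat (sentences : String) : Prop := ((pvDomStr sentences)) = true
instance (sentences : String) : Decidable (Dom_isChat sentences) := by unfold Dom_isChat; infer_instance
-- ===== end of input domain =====

-- B replaces token-splitting with a one-pass run-length state machine over characters (alternative, same behaviour on Pre_).

-- ===== PORT A =====
-- the 'for a in arr' loop: returns false on the first token of length > 1, else falls off the loop
def isChatLoop : List (List Char) → Bool
  | [] => true
  | a :: rest => if a.length > 1 then false else isChatLoop rest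

def isChat (sentences : String) : Bool :=
  if PySem.Str.len (PySem.Str.strip sentences) == 0 then true
  else
    -- arr = str(sentences).split(" "): sep is nonempty, so splitOn is its sep ≠ "" form
    isChatLoop (PySem.Chars.splitOn sentences.toList [' '])

-- ===== PORT B =====
-- the 'for c in s' loop carrying the run counter: false when a run of non-spaces reaches 2
def isChatAltLoop : List Char → Nat → Bool
  | [], _ => true
  | c :: rest, run =>
    let run' := if c = ' ' then 0 else run + 1
    if run' = 2 then false else isChatAltLoop rest run'

def isChat_alt (sentences : String) : Bool :=
  if PySem.Str.strip sentences = "" then true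
  else isChatAltLoop sentences.toList 0

-- ===== PRECONDITION & SPEC =====
-- Pre_ excludes inputs whose stripped form is nonempty but which contain no two adjacent
-- non-space characters (i.e. every space-delimited token has length ≤ 1): there Python A
-- falls off its loop and returns None, which is not a bool.
def Pre_isChat (sentences : String) : Prop :=
  PySem.Str.strip sentences = "" ∨
    ∃ p ∈ sentences.toList.zip sentences.toList.tail, p.1 ≠ ' ' ∧ p.2 ≠ ' '
instance (sentences : String) : Decidable (Pre_isChat sentences) := by unfold Pre_isChat; infer_instance

def pvWitness_isChat : String := "hello world"

def Spec_isChat (sentences : String) (out : Bool) : Prop := out = isChat_alt sentences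
instance (sentences : String) (out : Bool) : Decidable (Spec_isChat sentences out) := by unfold Spec_isChat; infer_instance

-- ===== CLAIM (what is proved, stated in full; the proofs are below) =====
def Claim_equal_isChat : Prop := ∀ (sentences : String), Dom_isChat sentences → Pre_isChat sentences → Spec_isChat sentences (isChat sentences)

-- ===== LEMMAS AND PROOFS =====

-- structural characterisation of split on a single space
def splitOnC : List Char → List (List Char)
  | [] => [[]]
  | a :: r => if a = ' ' then [] :: splitOnC r else (splitOnC r).modifyHead (a :: ·)

theorem splitOnC_ne_nil : ∀ cs : List Char, splitOnC cs ≠ []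
  | [] => by simp [splitOnC]
  | a :: r => by
    simp only [splitOnC]
    split_ifs
    · simp
    · cases hsc : splitOnC r with
      | nil => exact absurd hsc (splitOnC_ne_nil r)
      | cons x y => simp [List.modifyHead]

theorem splitOnC_cons_ex (r : List Char) : ∃ h0 t, splitOnC r = h0 :: t := by
  cases hsc : splitOnC r with
  | nil => exact absurd hsc (splitOnC_ne_nil r)
  | cons x y => exact ⟨x, y, rfl⟩

theorem go_spec (l : List Char) : ∀ (fuel : Nat) (cur : List Char) (acc : List (List Char)),
    l.length < fuel →
    PySem.Chars.splitOn.go [' '] fuel l cur acc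
      = acc.reverse ++ (splitOnC l).modifyHead (cur.reverse ++ ·) := by
  induction l with
  | nil =>
    intro fuel cur acc h
    cases fuel with
    | zero => omega
    | succ n => simp [PySem.Chars.splitOn.go, splitOnC]
  | cons a r ih =>
    intro fuel cur acc h
    cases fuel with
    | zero => omega
    | succ n =>
      obtain ⟨h0, t, ht⟩ := splitOnC_cons_ex r
      by_cases ha : a = ' '
      · subst ha
        rw [show PySem.Chars.splitOn.go [' '] (n+1) (' ' :: r) cur acc
              = PySem.Chars.splitOn.go [' '] n r [] (cur.reverse :: acc) by
            simp [PySem.Chars.splitOn.go, List.isPrefixOf]]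
        rw [ih n [] (cur.reverse :: acc) (by simpa using Nat.lt_of_succ_lt_succ h)]
        simp [splitOnC, ht, List.modifyHead]
      · rw [show PySem.Chars.splitOn.go [' '] (n+1) (a :: r) cur acc
              = PySem.Chars.splitOn.go [' '] n r (a :: cur) acc by
            simp only [PySem.Chars.splitOn.go, List.isPrefixOf, Bool.and_true]
            split_ifs with hpre
            · simp only [beq_iff_eq] at hpre
              exact absurd hpre.symm ha
            · rfl]
        rw [ih n (a :: cur) acc (by simpa using Nat.lt_of_succ_lt_succ h)]
        simp [splitOnC, ha, ht, List.modifyHead]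

theorem splitOn_eq (cs : List Char) : PySem.Chars.splitOn cs [' '] = splitOnC cs := by
  rw [PySem.Chars.splitOn, go_spec cs (cs.length + 1) [] [] (by omega)]
  obtain ⟨h0, t, ht⟩ := splitOnC_cons_ex cs
  simp [ht, List.modifyHead]

-- the token loop over the split equals the run-length state machine started at 0
theorem loop_eq : ∀ cs : List Char,
    isChatLoop (splitOnC cs) = isChatAltLoop cs 0
  | [] => by simp [splitOnC, isChatLoop, isChatAltLoop]
  | [a] => by
    by_cases ha : a = ' ' <;>
      simp [splitOnC, ha, isChatLoop, List.modifyHead, isChatAltLoop]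
  | a :: b :: r => by
    obtain ⟨h0, t, ht⟩ := splitOnC_cons_ex r
    by_cases ha : a = ' '
    · subst ha
      have h1 : splitOnC (' ' :: b :: r) = [] :: splitOnC (b :: r) := by simp [splitOnC]
      have h2 : isChatLoop ([] :: splitOnC (b :: r)) = isChatLoop (splitOnC (b :: r)) := by
        simp [isChatLoop]
      rw [h1, h2, loop_eq (b :: r)]
      simp [isChatAltLoop]
    · by_cases hb : b = ' '
      · subst hb
        have h1 : splitOnC (a :: ' ' :: r) = [a] :: splitOnC r := by
          simp [splitOnC, ha, List.modifyHead]
        have h2 : isChatLoop ([a] :: splitOnC r) = isChatLoop (splitOnC r) := by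
          simp [isChatLoop]
        rw [h1, h2, loop_eq r]
        simp [isChatAltLoop, ha]
      · have h1 : splitOnC (a :: b :: r) = (a :: b :: h0) :: t := by
          simp [splitOnC, ha, hb, ht, List.modifyHead]
        have h2 : isChatLoop ((a :: b :: h0) :: t) = false := by
          simp [isChatLoop]
        rw [h1, h2]
        simp [isChatAltLoop, ha, hb]

theorem guard_eq (s : String) :
    ((PySem.Str.len (PySem.Str.strip s) == 0) = true) ↔ PySem.Str.strip s = "" := by
  rw [PySem.Str.len_eq]
  rw [show (PySem.Str.strip s = "") ↔ (PySem.Str.strip s).toList = [] from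
    ⟨fun h => by simp [h], fun h => String.ext (by simpa [String.toList] using h)⟩]
  cases (PySem.Str.strip s).toList <;> simp <;> omega

-- ===== VERDICT (by name: the statement is the Claim_ definition above) =====
theorem isChat_spec : Claim_equal_isChat := by
  intro s _ _
  unfold Spec_isChat isChat isChat_alt
  by_cases h : PySem.Str.strip s = ""
  · rw [if_pos ((guard_eq s).2 h), if_pos h]
  · rw [if_neg (fun hc => h ((guard_eq s).1 hc)), if_neg h, splitOn_eq, loop_eq]
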